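-- pv_equiv track=rewrite | github.com/karthikadevi-20/Vehicle-Number-Detection | vehicle.py | correct_plate_number
-- ===== SOURCE A (Python) =====
-- def correct_plate_number(plate_number):
--     corrections = {
--         'LN': 'TN',
--         'lN': 'TN',
--         'lM': 'TN',
--         'IN': 'TN',
--
--     }
--     for wrong, correct in corrections.items():
--         if wrong in plate_number:
--             plate_number = plate_number.replace(wrong, correct)
--     return plate_number
-- ===== SOURCE B (Python) =====
-- def correct_plate_number(plate_number):
--     # One left-to-right scan replacing any of the four OCR pairs with 'TN',
--     # instead of four guarded full-string replace passes.
--     out = []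
--     i = 0
--     n = len(plate_number)
--     while i + 1 < n:
--         if plate_number[i:i + 2] in ('LN', 'lN', 'lM', 'IN'):
--             out.append('TN')
--             i += 2
--         else:
--             out.append(plate_number[i])
--             i += 1
--     out.append(plate_number[i:])
--     return ''.join(out)
-- ===== Notes on version B (the rewrite author's own statement) =====
-- stated objective: alternative
-- what changed: Replaces the four guarded full-string str.replace passes with a single left-to-right two-character scan that rewrites any of the four OCR pairs in one traversal (valid because the patterns cannot overlap each other and the replacement never creates a new match).
import Mathlib
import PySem

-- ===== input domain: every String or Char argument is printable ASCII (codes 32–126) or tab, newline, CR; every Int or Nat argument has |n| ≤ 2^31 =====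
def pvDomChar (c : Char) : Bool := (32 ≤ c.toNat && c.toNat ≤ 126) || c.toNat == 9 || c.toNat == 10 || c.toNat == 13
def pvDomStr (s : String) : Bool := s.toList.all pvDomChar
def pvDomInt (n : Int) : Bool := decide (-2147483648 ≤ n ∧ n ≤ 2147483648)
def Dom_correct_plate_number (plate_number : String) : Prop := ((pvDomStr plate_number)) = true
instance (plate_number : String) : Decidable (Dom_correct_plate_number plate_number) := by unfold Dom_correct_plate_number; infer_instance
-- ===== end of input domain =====

-- B replaces A's four guarded full-string replace passes with a single left-to-right
-- two-character scan (alternative decomposition; same result, proved equal).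

-- ===== PORT A =====
-- the corrections dict literal of A
def pvCorrections : PySem.Dict String String :=
  PySem.Dict.ofList [("LN", "TN"), ("lN", "TN"), ("lM", "TN"), ("IN", "TN")]

-- for wrong, correct in corrections.items(): if wrong in plate_number: plate_number = plate_number.replace(wrong, correct)
def correct_plate_number (plate_number : String) : String :=
  pvCorrections.items.foldl
    (fun pn wc =>
      if PySem.Str.isIn wc.1 pn then PySem.Str.replace pn wc.1 wc.2 else pn)
    plate_number

-- ===== PORT B =====
-- the while-loop of Source B: consume two chars on a match, one otherwise
def pvScan : List Char → List Char
  | a :: b :: t =>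
    if (a = 'L' ∧ b = 'N') ∨ (a = 'l' ∧ b = 'N') ∨ (a = 'l' ∧ b = 'M') ∨ (a = 'I' ∧ b = 'N') then
      'T' :: 'N' :: pvScan t
    else
      a :: pvScan (b :: t)
  | l => l

def correct_plate_number_alt (plate_number : String) : String :=
  String.ofList (pvScan plate_number.toList)

-- ===== PRECONDITION & SPEC =====
def Spec_correct_plate_number (plate_number : String) (out : String) : Prop := out = correct_plate_number_alt plate_number
instance (plate_number : String) (out : String) : Decidable (Spec_correct_plate_number plate_number out) := by unfold Spec_correct_plate_number; infer_instance

-- ===== CLAIM (what is proved, stated in full; the proofs are below) =====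
def Claim_equal_correct_plate_number : Prop := ∀ (plate_number : String), Dom_correct_plate_number plate_number → Spec_correct_plate_number plate_number (correct_plate_number plate_number)

-- ===== LEMMAS AND PROOFS =====

-- clean structural form of replacing the two-char pattern [o1,o2] by "TN"
def pvRep (o1 o2 : Char) : List Char → List Char
  | a :: b :: t =>
    if a = o1 ∧ b = o2 then 'T' :: 'N' :: pvRep o1 o2 t else a :: pvRep o1 o2 (b :: t)
  | l => l

-- Chars.replace.go with a length-2 pattern and enough fuel computes pvRep
theorem pvGo_eq (o1 o2 : Char) :
    ∀ (fuel : Nat) (l acc : List Char), l.length ≤ fuel →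
      PySem.Chars.replace.go [o1, o2] ['T', 'N'] fuel l acc = acc.reverse ++ pvRep o1 o2 l := by
  intro fuel
  induction fuel with
  | zero =>
    intro l acc h
    have : l = [] := List.eq_nil_of_length_eq_zero (Nat.le_zero.mp h)
    subst this
    simp [PySem.Chars.replace.go, pvRep]
  | succ n ih =>
    intro l acc h
    match l with
    | [] => simp [PySem.Chars.replace.go, pvRep]
    | c :: t =>
      rw [PySem.Chars.replace.go]
      by_cases hp : [o1, o2].isPrefixOf (c :: t) = true
      · rw [if_pos hp]
        cases t with
        | nil => simp [List.isPrefixOf] at hp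
        | cons b t' =>
          simp only [List.isPrefixOf, Bool.and_eq_true, beq_iff_eq] at hp
          obtain ⟨hc, hb, -⟩ := hp
          subst hc hb
          have hlen : t'.length ≤ n := by simp at h; omega
          rw [show List.drop [o1, o2].length (o1 :: o2 :: t') = t' from rfl]
          rw [ih t' (['T', 'N'].reverse ++ acc) hlen]
          simp [pvRep]
      · rw [if_neg hp]
        have hlen : t.length ≤ n := by simp at h; omega
        rw [ih t (c :: acc) hlen]
        cases t with
        | nil => simp [pvRep]
        | cons b t' =>
          have : ¬ (c = o1 ∧ b = o2) := by
            intro ⟨h1, h2⟩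
            simp [List.isPrefixOf, h1, h2] at hp
          simp [pvRep, this]

theorem pvReplace_eq (o1 o2 : Char) (l : List Char) :
    PySem.Chars.replace l [o1, o2] ['T', 'N'] = pvRep o1 o2 l := by
  rw [PySem.Chars.replace]
  simp only [List.isEmpty_cons, Bool.false_eq_true, if_false]
  exact pvGo_eq o1 o2 l.length l [] le_rfl

-- no occurrence ⇒ identity
theorem pvRep_id (o1 o2 : Char) : ∀ l, ¬ [o1, o2] <:+: l → pvRep o1 o2 l = l := by
  intro l
  induction l with
  | nil => intro _; rfl
  | cons a t ih =>
    intro h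
    match t with
    | [] => rfl
    | b :: t' =>
      have hmatch : ¬ (a = o1 ∧ b = o2) := by
        intro ⟨h1, h2⟩
        exact h ⟨[], t', by simp [h1, h2]⟩
      have htail : ¬ [o1, o2] <:+: (b :: t') := fun hi =>
        h (hi.trans (List.suffix_cons a (b :: t')).isInfix)
      simp [pvRep, hmatch, ih htail]

-- stepping: a head that cannot start a match passes through
theorem pvRep_cons (o1 o2 a : Char) (l : List Char)
    (h : a ≠ o1 ∨ ∀ c, l.head? = some c → c ≠ o2) :
    pvRep o1 o2 (a :: l) = a :: pvRep o1 o2 l := by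
  match l with
  | [] => rfl
  | b :: t =>
    have : ¬ (a = o1 ∧ b = o2) := by
      rcases h with h | h
      · exact fun ⟨h1, _⟩ => h h1
      · exact fun ⟨_, h2⟩ => h b rfl h2
    simp [pvRep, this]

-- the head of a rewritten list is the old head or 'T'
theorem pvRep_head (o1 o2 : Char) (l : List Char) :
    (pvRep o1 o2 l).head? = l.head? ∨ (pvRep o1 o2 l).head? = some 'T' := by
  match l with
  | [] => left; rfl
  | [a] => left; rfl
  | a :: b :: t =>
    by_cases h : a = o1 ∧ b = o2
    · right; simp [pvRep, h]
    · left; simp [pvRep, h]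

-- composite of the four replaces
def pvComp (l : List Char) : List Char :=
  pvRep 'I' 'N' (pvRep 'l' 'M' (pvRep 'l' 'N' (pvRep 'L' 'N' l)))

-- main structural lemma: the one-pass scan equals the composite of the four replaces
theorem pvScan_eq_comp : ∀ l, pvScan l = pvComp l := by
  intro l
  induction l using pvScan.induct with
  | case1 a b t hm ih =>
    rw [pvScan, if_pos hm]
    unfold pvComp
    rcases hm with ⟨ha, hb⟩ | ⟨ha, hb⟩ | ⟨ha, hb⟩ | ⟨ha, hb⟩ <;> subst ha hb
    · -- 'L','N'
      rw [show pvRep 'L' 'N' ('L' :: 'N' :: t) = 'T' :: 'N' :: pvRep 'L' 'N' t by simp [pvRep]]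
      rw [pvRep_cons 'l' 'N' 'T' _ (Or.inl (by decide)),
          pvRep_cons 'l' 'N' 'N' _ (Or.inl (by decide)),
          pvRep_cons 'l' 'M' 'T' _ (Or.inl (by decide)),
          pvRep_cons 'l' 'M' 'N' _ (Or.inl (by decide)),
          pvRep_cons 'I' 'N' 'T' _ (Or.inl (by decide)),
          pvRep_cons 'I' 'N' 'N' _ (Or.inl (by decide))]
      rw [ih]; rfl
    · -- 'l','N'
      rw [pvRep_cons 'L' 'N' 'l' _ (Or.inl (by decide)),
          pvRep_cons 'L' 'N' 'N' _ (Or.inl (by decide))]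
      rw [show pvRep 'l' 'N' ('l' :: 'N' :: pvRep 'L' 'N' t)
            = 'T' :: 'N' :: pvRep 'l' 'N' (pvRep 'L' 'N' t) by simp [pvRep]]
      rw [pvRep_cons 'l' 'M' 'T' _ (Or.inl (by decide)),
          pvRep_cons 'l' 'M' 'N' _ (Or.inl (by decide)),
          pvRep_cons 'I' 'N' 'T' _ (Or.inl (by decide)),
          pvRep_cons 'I' 'N' 'N' _ (Or.inl (by decide))]
      rw [ih]; rfl
    · -- 'l','M'
      rw [pvRep_cons 'L' 'N' 'l' _ (Or.inl (by decide)),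
          pvRep_cons 'L' 'N' 'M' _ (Or.inl (by decide)),
          pvRep_cons 'l' 'N' 'l' _ (Or.inr (by intro c hc; simp at hc; subst hc; decide)),
          pvRep_cons 'l' 'N' 'M' _ (Or.inl (by decide))]
      rw [show pvRep 'l' 'M' ('l' :: 'M' :: pvRep 'l' 'N' (pvRep 'L' 'N' t))
            = 'T' :: 'N' :: pvRep 'l' 'M' (pvRep 'l' 'N' (pvRep 'L' 'N' t)) by simp [pvRep]]
      rw [pvRep_cons 'I' 'N' 'T' _ (Or.inl (by decide)),
          pvRep_cons 'I' 'N' 'N' _ (Or.inl (by decide))]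
      rw [ih]; rfl
    · -- 'I','N'
      rw [pvRep_cons 'L' 'N' 'I' _ (Or.inl (by decide)),
          pvRep_cons 'L' 'N' 'N' _ (Or.inl (by decide)),
          pvRep_cons 'l' 'N' 'I' _ (Or.inl (by decide)),
          pvRep_cons 'l' 'N' 'N' _ (Or.inl (by decide)),
          pvRep_cons 'l' 'M' 'I' _ (Or.inl (by decide)),
          pvRep_cons 'l' 'M' 'N' _ (Or.inl (by decide))]
      rw [show pvRep 'I' 'N' ('I' :: 'N' :: pvRep 'l' 'M' (pvRep 'l' 'N' (pvRep 'L' 'N' t)))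
            = 'T' :: 'N' :: pvRep 'I' 'N' (pvRep 'l' 'M' (pvRep 'l' 'N' (pvRep 'L' 'N' t))) by simp [pvRep]]
      rw [ih]; rfl
  | case2 a b t hm ih =>
    rw [pvScan, if_neg hm]
    push Not at hm
    obtain ⟨h1, h2, h3, h4⟩ := hm
    unfold pvComp
    rw [pvRep_cons 'L' 'N' a _ (by
      by_cases ha : a = 'L'
      · right; intro c hc hcn
        simp at hc; subst hc; subst hcn
        exact h1 ha rfl
      · exact Or.inl ha)]
    rw [pvRep_cons 'l' 'N' a _ (by
      by_cases ha : a = 'l'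
      · right; intro c hc hcn; subst hcn
        rcases pvRep_head 'L' 'N' (b :: t) with hh | hh <;> rw [hh] at hc <;> simp at hc
        · exact h2 ha hc
      · exact Or.inl ha)]
    rw [pvRep_cons 'l' 'M' a _ (by
      by_cases ha : a = 'l'
      · right; intro c hc hcn; subst hcn
        rcases pvRep_head 'l' 'N' (pvRep 'L' 'N' (b :: t)) with hh | hh <;> rw [hh] at hc
        · rcases pvRep_head 'L' 'N' (b :: t) with hh' | hh' <;> rw [hh'] at hc <;> simp at hc
          · exact h3 ha hc
        · simp at hc
      · exact Or.inl ha)]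
    rw [pvRep_cons 'I' 'N' a _ (by
      by_cases ha : a = 'I'
      · right; intro c hc hcn; subst hcn
        rcases pvRep_head 'l' 'M' (pvRep 'l' 'N' (pvRep 'L' 'N' (b :: t))) with hh | hh <;> rw [hh] at hc
        · rcases pvRep_head 'l' 'N' (pvRep 'L' 'N' (b :: t)) with hh' | hh' <;> rw [hh'] at hc
          · rcases pvRep_head 'L' 'N' (b :: t) with hh'' | hh'' <;> rw [hh''] at hc <;> simp at hc
            · exact h4 ha hc
          · simp at hc
        · simp at hc
      · exact Or.inl ha)]
    rw [ih]; rfl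
  | case3 l h =>
    cases l with
    | nil => rfl
    | cons a t =>
      cases t with
      | nil => rfl
      | cons b t' => exact absurd rfl (h a b t')

-- one guarded Chars-level step of A equals pvRep
theorem pvStep_eq (o1 o2 : Char) (l : List Char) :
    (if PySem.Chars.isIn [o1, o2] l then PySem.Chars.replace l [o1, o2] ['T', 'N'] else l)
      = pvRep o1 o2 l := by
  by_cases h : PySem.Chars.isIn [o1, o2] l = true
  · rw [if_pos h, pvReplace_eq]
  · rw [if_neg h]
    have := (PySem.Chars.isIn_eq_false_iff _ _).mp (Bool.eq_false_iff.mpr h)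
    exact (pvRep_id o1 o2 l this).symm

-- one guarded Str-level step of A, pushed down to toList
theorem pvStrStep_eq (w : String) (o1 o2 : Char) (hw : w.toList = [o1, o2]) (pn : String) :
    (if PySem.Str.isIn w pn then PySem.Str.replace pn w "TN" else pn).toList
      = pvRep o1 o2 pn.toList := by
  rw [← pvStep_eq o1 o2 pn.toList]
  by_cases h : PySem.Str.isIn w pn = true
  · have hc : PySem.Chars.isIn [o1, o2] pn.toList = true := by
      rw [PySem.Str.isIn, hw] at h; exact h
    rw [if_pos h, if_pos hc]
    rw [PySem.Str.replace]
    simp [hw]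
  · have hc : ¬ PySem.Chars.isIn [o1, o2] pn.toList = true := by
      rw [PySem.Str.isIn, hw] at h; exact h
    rw [if_neg h, if_neg hc]

theorem pvA_toList (s : String) : (correct_plate_number s).toList = pvComp s.toList := by
  have hitems : pvCorrections.items = [("LN", "TN"), ("lN", "TN"), ("lM", "TN"), ("IN", "TN")] := by
    decide
  rw [correct_plate_number, hitems]
  simp only [List.foldl_cons, List.foldl_nil]
  unfold pvComp
  rw [pvStrStep_eq "IN" 'I' 'N' rfl, pvStrStep_eq "lM" 'l' 'M' rfl,
      pvStrStep_eq "lN" 'l' 'N' rfl, pvStrStep_eq "LN" 'L' 'N' rfl]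

-- ===== VERDICT (by name: the statement is the Claim_ definition above) =====
theorem correct_plate_number_spec : Claim_equal_correct_plate_number := by
  intro s _
  unfold Spec_correct_plate_number correct_plate_number_alt
  apply String.toList_inj.mp
  rw [pvA_toList, pvScan_eq_comp]
  simp
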